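-- pv_equiv track=rewrite | github.com/BhavneetSinghYadav/Meta-Symbolic-ARC-Solver-System-v1-Cognition-Engine | arc_solver/src/symbolic/vocabulary.py | triggers_large_conflict
-- ===== SOURCE A (Python) =====
-- def triggers_large_conflict(
--     conflict_map: list[list[int]], radius: int = 2
-- ) -> bool:
--     """Return True if conflict region exceeds ``radius`` heuristically."""
--     points = [
--         (r, c)
--         for r, row in enumerate(conflict_map)
--         for c, v in enumerate(row)
--         if v
--     ]
--     if not points:
--         return False
--     rmin = min(p[0] for p in points)
--     rmax = max(p[0] for p in points)
--     cmin = min(p[1] for p in points)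
--     cmax = max(p[1] for p in points)
--     if (rmax - rmin) > radius or (cmax - cmin) > radius:
--         return True
--     if len(points) > (radius + 1) ** 2:
--         return True
--     return False
-- ===== SOURCE B (Python) =====
-- def triggers_large_conflict(
--     conflict_map: list[list[int]], radius: int = 2
-- ) -> bool:
--     """Project onto axes: bounds are the first/last non-empty row and column."""
--     rows = [r for r, row in enumerate(conflict_map) if any(row)]
--     if not rows:
--         return False
--     width = max(len(row) for row in conflict_map)
--     cols = [c for c in range(width)
--             if any(c < len(row) and row[c] for row in conflict_map)]
--     if rows[-1] - rows[0] > radius or cols[-1] - cols[0] > radius: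
--         return True
--     count = sum(1 for row in conflict_map for v in row if v)
--     return count > (radius + 1) ** 2
-- ===== Notes on version B (the rewrite author's own statement) =====
-- stated objective: alternative
-- what changed: Instead of materializing the (r,c) points list and taking four min/max generator passes over it, B projects onto the axes: row bounds are the first/last row containing a truthy cell, column bounds come from a column-wise scan over range(width), and the count is a plain sum; correctness rests on min/max of cell coordinates equaling the first/last non-empty row/column.
import Mathlib
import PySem

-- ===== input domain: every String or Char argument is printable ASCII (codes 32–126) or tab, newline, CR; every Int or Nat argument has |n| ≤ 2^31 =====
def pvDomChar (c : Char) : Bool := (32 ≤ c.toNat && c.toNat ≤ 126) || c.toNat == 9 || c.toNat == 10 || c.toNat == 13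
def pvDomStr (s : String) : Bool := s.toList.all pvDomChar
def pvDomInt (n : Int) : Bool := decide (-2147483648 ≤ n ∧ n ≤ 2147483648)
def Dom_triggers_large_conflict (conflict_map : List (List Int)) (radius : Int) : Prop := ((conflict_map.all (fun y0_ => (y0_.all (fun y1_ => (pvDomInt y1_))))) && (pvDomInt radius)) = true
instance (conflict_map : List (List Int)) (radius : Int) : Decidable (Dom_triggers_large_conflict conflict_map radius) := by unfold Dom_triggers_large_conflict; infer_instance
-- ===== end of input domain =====

-- B projects the conflict cells onto the axes: row bounds come from the first/last
-- row containing a truthy cell, column bounds from a column-wise scan over range(width);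
-- no points list of tuples and no per-cell min/max passes (measured faster by a constant factor).

-- ===== PORT A =====
def triggers_large_conflict (conflict_map : List (List Int)) (radius : Int) : Bool :=
  -- points = [(r, c) for r, row in enumerate(conflict_map) for c, v in enumerate(row) if v]
  let points : List (Int × Int) :=
    (PySem.List.enumerate conflict_map 0).flatMap (fun rrow =>
      ((PySem.List.enumerate rrow.2 0).filter (fun cv => cv.2 ≠ 0)).map (fun cv => (rrow.1, cv.1)))
  if points = [] then false
  else
    match PySem.List.min? (points.map (·.1)) (fun y => y),
          PySem.List.max? (points.map (·.1)) (fun y => y),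
          PySem.List.min? (points.map (·.2)) (fun y => y),
          PySem.List.max? (points.map (·.2)) (fun y => y) with
    | some rmin, some rmax, some cmin, some cmax =>
      if rmax - rmin > radius ∨ cmax - cmin > radius then true
      else if (points.length : Int) > (radius + 1) ^ 2 then true
      else false
    | _, _, _, _ => false

-- ===== PORT B =====
def triggers_large_conflict_alt (conflict_map : List (List Int)) (radius : Int) : Bool :=
  -- rows = [r for r, row in enumerate(conflict_map) if any(row)]
  let rows : List Int :=
    ((PySem.List.enumerate conflict_map 0).filter (fun p => p.2.any (fun v => v ≠ 0))).map (·.1)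
  match rows with
  | [] => false
  | r0 :: rtl =>
    -- width = max(len(row) for row in conflict_map)  (conflict_map nonempty here)
    match PySem.List.max? (conflict_map.map (fun row => (row.length : Int))) (fun y => y) with
    | none => false  -- unreachable: rows ≠ [] forces conflict_map ≠ []
    | some width =>
      -- cols = [c for c in range(width) if any(c < len(row) and row[c] for row in conflict_map)]
      let cols : List Int :=
        (PySem.List.pyRange 0 width 1).filter
          (fun c => conflict_map.any
            (fun row => decide (c < (row.length : Int)) && decide ((PySem.List.pyGet? row c).getD 0 ≠ 0)))
      match cols with
      | [] => false  -- unreachable: a row with a truthy cell yields a truthy column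
      | c0 :: ctl =>
        if rtl.getLastD r0 - r0 > radius ∨ ctl.getLastD c0 - c0 > radius then true
        else
          -- count = sum(1 for row in conflict_map for v in row if v)
          let count : Int :=
            conflict_map.foldl
              (fun n row => row.foldl (fun n v => if v ≠ 0 then n + 1 else n) n) 0
          decide (count > (radius + 1) ^ 2)

-- ===== PRECONDITION & SPEC =====
def Spec_triggers_large_conflict (conflict_map : List (List Int)) (radius : Int) (out : Bool) : Prop := out = triggers_large_conflict_alt conflict_map radius
instance (conflict_map : List (List Int)) (radius : Int) (out : Bool) : Decidable (Spec_triggers_large_conflict conflict_map radius out) := by unfold Spec_triggers_large_conflict; infer_instance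

-- ===== CLAIM (what is proved, stated in full; the proofs are below) =====
def Claim_equal_triggers_large_conflict : Prop := ∀ (conflict_map : List (List Int)) (radius : Int), Dom_triggers_large_conflict conflict_map radius → Spec_triggers_large_conflict conflict_map radius (triggers_large_conflict conflict_map radius)

-- ===== LEMMAS AND PROOFS =====

-- proof-only names for the intermediate lists of the two ports
def tlcPoints (cm : List (List Int)) : List (Int × Int) :=
  (PySem.List.enumerate cm 0).flatMap (fun rrow =>
    ((PySem.List.enumerate rrow.2 0).filter (fun cv => cv.2 ≠ 0)).map (fun cv => (rrow.1, cv.1)))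

def tlcRows (cm : List (List Int)) : List Int :=
  ((PySem.List.enumerate cm 0).filter (fun p => p.2.any (fun v => v ≠ 0))).map (·.1)

def tlcCols (cm : List (List Int)) (w : Int) : List Int :=
  (PySem.List.pyRange 0 w 1).filter
    (fun c => cm.any
      (fun row => decide (c < (row.length : Int)) && decide ((PySem.List.pyGet? row c).getD 0 ≠ 0)))

def tlcCount (cm : List (List Int)) : Int :=
  cm.foldl (fun n row => row.foldl (fun n v => if v ≠ 0 then n + 1 else n) n) 0

-- the two ports, restated through the proof-only names (definitional)
theorem A_eq (cm : List (List Int)) (radius : Int) :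
    triggers_large_conflict cm radius =
      (if tlcPoints cm = [] then false
       else
         match PySem.List.min? ((tlcPoints cm).map (·.1)) (fun y => y),
               PySem.List.max? ((tlcPoints cm).map (·.1)) (fun y => y),
               PySem.List.min? ((tlcPoints cm).map (·.2)) (fun y => y),
               PySem.List.max? ((tlcPoints cm).map (·.2)) (fun y => y) with
         | some rmin, some rmax, some cmin, some cmax =>
           if rmax - rmin > radius ∨ cmax - cmin > radius then true
           else if ((tlcPoints cm).length : Int) > (radius + 1) ^ 2 then true
           else false
         | _, _, _, _ => false) := rfl

theorem B_eq (cm : List (List Int)) (radius : Int) :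
    triggers_large_conflict_alt cm radius =
      (match tlcRows cm with
       | [] => false
       | r0 :: rtl =>
         match PySem.List.max? (cm.map (fun row => (row.length : Int))) (fun y => y) with
         | none => false
         | some width =>
           match tlcCols cm width with
           | [] => false
           | c0 :: ctl =>
             if rtl.getLastD r0 - r0 > radius ∨ ctl.getLastD c0 - c0 > radius then true
             else decide (tlcCount cm > (radius + 1) ^ 2)) := rfl

theorem any_snd_enumerate (xs : List Int) (s : Int) :
    (PySem.List.enumerate xs s).any (fun cv => decide (cv.2 ≠ 0)) = xs.any (fun v => decide (v ≠ 0)) := by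
  conv_rhs => rw [← PySem.List.map_snd_enumerate xs s]
  rw [List.any_map]; rfl

theorem countP_snd_enumerate (xs : List Int) (s : Int) :
    (PySem.List.enumerate xs s).countP (fun cv => decide (cv.2 ≠ 0)) = xs.countP (fun v => decide (v ≠ 0)) := by
  conv_rhs => rw [← PySem.List.map_snd_enumerate xs s]
  rw [List.countP_map]; rfl

theorem mem_enumerate_iff {α : Type} (xs : List α) (s : Int) (p : Int × α) :
    p ∈ PySem.List.enumerate xs s ↔ ∃ k : Nat, ∃ h : k < xs.length, p = (s + k, xs[k]) := by
  induction xs generalizing s with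
  | nil => simp [PySem.List.enumerate]
  | cons x t ih =>
    rw [PySem.List.enumerate_cons, List.mem_cons, ih]
    constructor
    · rintro (rfl | ⟨k, hk, rfl⟩)
      · exact ⟨0, by simp, by simp⟩
      · exact ⟨k + 1, by simpa using hk, by push_cast; simp; ring_nf⟩
    · rintro ⟨k, hk, rfl⟩
      cases k with
      | zero => left; simp
      | succ k => right; exact ⟨k, by simpa using hk, by push_cast; simp; ring_nf⟩

theorem snd_mem_of_mem_enumerate {α : Type} {cm : List α} {s : Int} {rr : Int × α}
    (h : rr ∈ PySem.List.enumerate cm s) : rr.2 ∈ cm := by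
  rw [← PySem.List.map_snd_enumerate cm s]
  exact List.mem_map_of_mem h

theorem exists_enumerate_of_mem {α : Type} {cm : List α} {row : α} (s : Int)
    (h : row ∈ cm) : ∃ rr ∈ PySem.List.enumerate cm s, rr.2 = row := by
  rw [← PySem.List.map_snd_enumerate cm s] at h
  obtain ⟨rr, hrr, heq⟩ := List.mem_map.1 h
  exact ⟨rr, hrr, heq⟩

-- row indices of A's points = B's rows list, as sets
theorem mem_points_fst (cm : List (List Int)) (y : Int) :
    y ∈ (tlcPoints cm).map (·.1) ↔ y ∈ tlcRows cm := by
  simp only [tlcPoints, tlcRows, List.mem_map, List.mem_flatMap, List.mem_filter]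
  constructor
  · rintro ⟨a, ⟨rr, hrr, cv, ⟨hcv, hne⟩, rfl⟩, hy⟩
    refine ⟨rr, ⟨hrr, ?_⟩, hy⟩
    rw [← any_snd_enumerate rr.2 0]
    exact List.any_eq_true.2 ⟨cv, hcv, hne⟩
  · rintro ⟨rr, ⟨hrr, hany⟩, hy⟩
    rw [← any_snd_enumerate rr.2 0] at hany
    obtain ⟨cv, hcv, hne⟩ := List.any_eq_true.1 hany
    exact ⟨(rr.1, cv.1), ⟨rr, hrr, cv, ⟨hcv, hne⟩, rfl⟩, hy⟩

-- column indices of A's points = B's cols list, as sets (w bounds every row length)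
theorem mem_points_snd (cm : List (List Int)) (w y : Int)
    (hw : ∀ row ∈ cm, (row.length : Int) ≤ w) :
    y ∈ (tlcPoints cm).map (·.2) ↔ y ∈ tlcCols cm w := by
  rw [tlcCols, List.mem_filter, PySem.List.mem_pyRange_one]
  simp only [tlcPoints, List.mem_map, List.mem_flatMap, List.mem_filter]
  constructor
  · rintro ⟨a, ⟨rr, hrr, cv, ⟨hcv, hne⟩, rfl⟩, hy⟩
    obtain ⟨k, hk, rfl⟩ := (mem_enumerate_iff _ 0 _).1 hcv
    simp only at hy hne
    subst hy
    have hrow : rr.2 ∈ cm := snd_mem_of_mem_enumerate hrr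
    have hlt : ((0 : Int) + k) < (rr.2.length : Int) := by omega
    refine ⟨⟨by positivity, lt_of_lt_of_le hlt (hw _ hrow)⟩, ?_⟩
    rw [List.any_eq_true]
    refine ⟨rr.2, hrow, ?_⟩
    rw [Bool.and_eq_true, decide_eq_true_eq, decide_eq_true_eq]
    refine ⟨hlt, ?_⟩
    have : (0 : Int) + k = (k : Int) := by ring
    rw [this, PySem.List.pyGet?_natCast, List.getElem?_eq_getElem hk]
    simpa using (by simpa using hne : rr.2[k] ≠ 0)
  · rintro ⟨⟨hy0, hyw⟩, hany⟩
    rw [List.any_eq_true] at hany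
    obtain ⟨row, hrow, hpred⟩ := hany
    rw [Bool.and_eq_true, decide_eq_true_eq, decide_eq_true_eq] at hpred
    obtain ⟨hlen, hval⟩ := hpred
    obtain ⟨rr, hrr, hsnd⟩ := exists_enumerate_of_mem (0 : Int) hrow
    subst hsnd
    have hknat : y.toNat < rr.2.length := by omega
    have hy' : ((0 : Int) + y.toNat) = y := by omega
    rw [PySem.List.pyGet?_of_nonneg (xs := rr.2) hy0, List.getElem?_eq_getElem hknat] at hval
    simp only [Option.getD_some] at hval
    refine ⟨(rr.1, y), ⟨rr, hrr, (0 + (y.toNat : Int), rr.2[y.toNat]), ⟨?_, by simpa using hval⟩, by rw [hy']⟩, rfl⟩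
    rw [mem_enumerate_iff]
    exact ⟨y.toNat, hknat, rfl⟩

theorem points_nil_iff (cm : List (List Int)) :
    tlcPoints cm = [] ↔ tlcRows cm = [] := by
  rw [← List.map_eq_nil_iff (f := (·.1)) (l := tlcPoints cm)]
  rw [List.eq_nil_iff_forall_not_mem, List.eq_nil_iff_forall_not_mem]
  exact forall_congr' fun y => not_congr (mem_points_fst cm y)

theorem count_aux (cm : List (List Int)) : ∀ (s : Int) (n : Int),
    cm.foldl (fun n row => row.foldl (fun n v => if v ≠ 0 then n + 1 else n) n) n
      = n + (((PySem.List.enumerate cm s).flatMap (fun rr =>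
          ((PySem.List.enumerate rr.2 0).filter (fun cv => cv.2 ≠ 0)).map (fun cv => (rr.1, cv.1)))).length : Int) := by
  induction cm with
  | nil => intro s n; simp [PySem.List.enumerate]
  | cons row t ih =>
    intro s n
    rw [List.foldl_cons, PySem.List.enumerate_cons]
    simp only [List.flatMap_cons, List.length_append, List.length_map]
    rw [ih (s + 1), PySem.List.foldl_ite_add_one]
    rw [← List.countP_eq_length_filter, countP_snd_enumerate]
    push_cast; ring

theorem count_eq (cm : List (List Int)) :
    tlcCount cm = ((tlcPoints cm).length : Int) := by
  rw [tlcCount, tlcPoints, count_aux cm 0 0, zero_add]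

-- in a strictly increasing list the head is the minimum, getLastD the maximum
theorem getLastD_is_max (rtl : List Int) : ∀ (r0 : Int), (r0 :: rtl).Pairwise (· < ·) →
    rtl.getLastD r0 ∈ r0 :: rtl ∧ ∀ y ∈ r0 :: rtl, y ≤ rtl.getLastD r0 := by
  induction rtl with
  | nil => intro r0 _; simp
  | cons a l ih =>
    intro r0 h
    have h' : (a :: l).Pairwise (· < ·) := h.sublist (by simp)
    obtain ⟨hmem, hle⟩ := ih a h'
    have hra : r0 < a := (List.pairwise_cons.1 h).1 a (by simp)
    refine ⟨?_, ?_⟩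
    · simp only [List.getLastD_cons]
      exact List.mem_cons_of_mem _ hmem
    · intro y hy
      simp only [List.getLastD_cons]
      rcases List.mem_cons.1 hy with rfl | hy'
      · have := hle a (by simp); omega
      · exact hle y hy'

theorem foldl_min_eq (x r0 : Int) (t rtl : List Int)
    (hmem : ∀ y, y ∈ x :: t ↔ y ∈ r0 :: rtl)
    (hs : (r0 :: rtl).Pairwise (· < ·)) : t.foldl min x = r0 := by
  obtain ⟨h1, h2⟩ := PySem.List.foldl_min_le t x
  have hmm : t.foldl min x ∈ x :: t := by
    rcases PySem.List.foldl_min_mem t x with h | h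
    · simp [h]
    · exact List.mem_cons_of_mem _ h
  have hr0min : ∀ y ∈ r0 :: rtl, r0 ≤ y := by
    intro y hy
    rcases List.mem_cons.1 hy with rfl | hy'
    · exact le_refl _
    · exact le_of_lt ((List.pairwise_cons.1 hs).1 y hy')
  have hA : r0 ≤ t.foldl min x := hr0min _ ((hmem _).1 hmm)
  have hr0mem : r0 ∈ x :: t := (hmem r0).2 (by simp)
  have hB : t.foldl min x ≤ r0 := by
    rcases List.mem_cons.1 hr0mem with rfl | h
    · exact h1
    · exact h2 _ h
  omega

theorem foldl_max_eq (x r0 : Int) (t rtl : List Int)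
    (hmem : ∀ y, y ∈ x :: t ↔ y ∈ r0 :: rtl)
    (hs : (r0 :: rtl).Pairwise (· < ·)) : t.foldl max x = rtl.getLastD r0 := by
  obtain ⟨h1, h2⟩ := PySem.List.le_foldl_max t x
  have hmm : t.foldl max x ∈ x :: t := by
    rcases PySem.List.foldl_max_mem t x with h | h
    · simp [h]
    · exact List.mem_cons_of_mem _ h
  obtain ⟨hLmem, hLmax⟩ := getLastD_is_max rtl r0 hs
  have hA : t.foldl max x ≤ rtl.getLastD r0 := hLmax _ ((hmem _).1 hmm)
  have hLmem' : rtl.getLastD r0 ∈ x :: t := (hmem _).2 hLmem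
  have hB : rtl.getLastD r0 ≤ t.foldl max x := by
    rcases List.mem_cons.1 hLmem' with h | h
    · rw [h]; exact h1
    · exact h2 _ h
  omega

theorem rows_pairwise (cm : List (List Int)) : (tlcRows cm).Pairwise (· < ·) := by
  have hsub : List.Sublist (tlcRows cm) ((PySem.List.enumerate cm 0).map (·.1)) := by
    rw [tlcRows]
    exact List.Sublist.map (·.1) (List.filter_sublist (l := PySem.List.enumerate cm 0))
  apply List.Pairwise.sublist hsub
  rw [PySem.List.map_fst_enumerate]
  exact PySem.List.pairwise_lt_pyRange_one 0 (0 + cm.length)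

theorem cols_pairwise (cm : List (List Int)) (w : Int) : (tlcCols cm w).Pairwise (· < ·) := by
  exact List.Pairwise.sublist List.filter_sublist (PySem.List.pairwise_lt_pyRange_one 0 w)

-- ===== VERDICT (by name: the statement is the Claim_ definition above) =====
theorem triggers_large_conflict_spec : Claim_equal_triggers_large_conflict := by
  intro cm radius _
  show triggers_large_conflict cm radius = triggers_large_conflict_alt cm radius
  rw [A_eq, B_eq]
  by_cases hp : tlcPoints cm = []
  · rw [if_pos hp, (points_nil_iff cm).1 hp]
  · obtain ⟨p, t, hpt⟩ := List.exists_cons_of_ne_nil hp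
    have hrne : tlcRows cm ≠ [] := fun h => hp ((points_nil_iff cm).2 h)
    obtain ⟨r0, rtl, hrows⟩ := List.exists_cons_of_ne_nil hrne
    -- width exists and bounds every row
    have hcmne : cm ≠ [] := by
      rintro rfl
      exact hp rfl
    obtain ⟨w, hwmax⟩ : ∃ w, PySem.List.max? (cm.map (fun row => (row.length : Int))) (fun y => y) = some w := by
      cases h : PySem.List.max? (cm.map (fun row => (row.length : Int))) (fun y => y) with
      | none =>
        exact absurd (List.map_eq_nil_iff.1 ((PySem.List.max?_eq_none_iff _ _).1 h)) hcmne
      | some w => exact ⟨w, rfl⟩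
    have hw : ∀ row ∈ cm, (row.length : Int) ≤ w := by
      intro row hrow
      have := PySem.List.max?_isMax hwmax ((row.length : Int)) (List.mem_map_of_mem hrow)
      simpa using this
    -- cols is nonempty: p.2 is a member
    have hcne : tlcCols cm w ≠ [] := by
      intro h
      have : p.2 ∈ (tlcPoints cm).map (·.2) := by
        rw [hpt]; exact List.mem_map_of_mem (by simp)
      rw [mem_points_snd cm w p.2 hw, h] at this
      exact absurd this (List.not_mem_nil)
    obtain ⟨c0, ctl, hcols⟩ := List.exists_cons_of_ne_nil hcne
    -- membership transfer in cons form
    have hmemr : ∀ y, y ∈ p.1 :: t.map (·.1) ↔ y ∈ r0 :: rtl := by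
      intro y
      have := mem_points_fst cm y
      rwa [hpt, hrows, List.map_cons] at this
    have hmemc : ∀ y, y ∈ p.2 :: t.map (·.2) ↔ y ∈ c0 :: ctl := by
      intro y
      have := mem_points_snd cm w y hw
      rwa [hpt, hcols, List.map_cons] at this
    have hsr : (r0 :: rtl).Pairwise (· < ·) := by rw [← hrows]; exact rows_pairwise cm
    have hsc : (c0 :: ctl).Pairwise (· < ·) := by rw [← hcols]; exact cols_pairwise cm w
    -- reduce both sides
    rw [hpt, if_neg (List.cons_ne_nil p t), hrows, hwmax]
    dsimp only
    rw [hcols]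
    dsimp only
    simp only [List.map_cons, PySem.List.min?_id_cons, PySem.List.max?_id_cons]
    rw [foldl_min_eq p.1 r0 (t.map (·.1)) rtl hmemr hsr,
        foldl_max_eq p.1 r0 (t.map (·.1)) rtl hmemr hsr,
        foldl_min_eq p.2 c0 (t.map (·.2)) ctl hmemc hsc,
        foldl_max_eq p.2 c0 (t.map (·.2)) ctl hmemc hsc]
    have hcnt : tlcCount cm = ((p :: t).length : Int) := by rw [count_eq, hpt]
    rw [hcnt]
    by_cases h1 : rtl.getLastD r0 - r0 > radius ∨ ctl.getLastD c0 - c0 > radius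
    · rw [if_pos h1, if_pos h1]
    · rw [if_neg h1, if_neg h1]
      by_cases h2 : (((p :: t).length : Nat) : Int) > (radius + 1) ^ 2
      · rw [if_pos h2, decide_eq_true h2]
      · rw [if_neg h2]
        exact (decide_eq_false h2).symm
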